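-- pv_equiv track=rewrite | github.com/eduardo551-bit/audio-to-score-studio | scripts/build_songbook_library.py | preferred_label
-- ===== SOURCE A (Python) =====
-- def preferred_label(labels: list[str], fallback: str) -> str:
--     non_empty = [label for label in labels if label]
--     if not non_empty:
--         return fallback
--     ranked = sorted(
--         non_empty,
--         key=lambda label: (
--             " " not in label,
--             label.lower() == label,
--             len(label),
--         ),
--         reverse=True,
--     )
--     return ranked[0]
-- ===== SOURCE B (Python) =====
-- def preferred_label(labels: list[str], fallback: str) -> str:
--     best = None
--     best_key = None
--     for label in labels:
--         if not label:
--             continue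
--         key = (" " not in label, label.lower() == label, len(label))
--         if best is None or key > best_key:
--             best = label
--             best_key = key
--     return fallback if best is None else best
-- ===== Notes on version B (the rewrite author's own statement) =====
-- stated objective: faster
-- what changed: Replaces filter + stable reverse sort + take-head by a single best-so-far pass that keeps the first label with the strictly greatest key tuple.
import Mathlib
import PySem

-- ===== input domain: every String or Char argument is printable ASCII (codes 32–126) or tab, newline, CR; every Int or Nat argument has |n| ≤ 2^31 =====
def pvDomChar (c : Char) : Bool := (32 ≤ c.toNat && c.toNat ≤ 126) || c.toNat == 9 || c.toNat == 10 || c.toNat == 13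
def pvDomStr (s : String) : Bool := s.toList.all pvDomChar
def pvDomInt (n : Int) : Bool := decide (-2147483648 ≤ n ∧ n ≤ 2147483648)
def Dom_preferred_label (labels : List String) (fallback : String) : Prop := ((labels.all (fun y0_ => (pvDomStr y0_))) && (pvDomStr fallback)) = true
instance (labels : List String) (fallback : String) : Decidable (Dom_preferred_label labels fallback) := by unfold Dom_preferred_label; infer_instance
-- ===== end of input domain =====

-- B replaces A's filter + stable reverse sort + take-head by one best-so-far pass (alternative decomposition, same result).

-- ===== PORT A =====
-- Python's 3-tuple key (" " not in l, l.lower() == l, len(l)) is sorted with sorted2: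
-- the first two components are booleans, so packing them as 2*b1 + b2 into the first
-- Int key is order-isomorphic to comparing (b1, b2) lexicographically; the length is
-- the second key. The produced ordering (hence the stable sort) is exactly Python's.
def keyA1 (l : String) : Int :=
  (if !(PySem.Str.isIn " " l) then 2 else 0) + (if PySem.Str.lower l == l then 1 else 0)

def keyA2 (l : String) : Int := PySem.Str.len l

def preferred_label (labels : List String) (fallback : String) : String :=
  let non_empty := labels.filter (fun l => l != "")
  if non_empty.isEmpty then fallback
  else
    let ranked := PySem.List.sorted2 non_empty keyA1 keyA2 true
    ranked.headD ""   -- ranked[0]; ranked is nonempty under the guard, so the default is never used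

-- ===== PORT B =====
def keyB (l : String) : Bool × Bool × Int :=
  (!(PySem.Str.isIn " " l), PySem.Str.lower l == l, PySem.Str.len l)

-- Python tuple comparison `key > best_key` on (Bool, Bool, Int), written out lexicographically
def keyGt (a b : Bool × Bool × Int) : Bool :=
  (decide (b.1 < a.1)) || (a.1 == b.1 && ((decide (b.2.1 < a.2.1)) || (a.2.1 == b.2.1 && decide (b.2.2 < a.2.2))))

def preferred_label_alt (labels : List String) (fallback : String) : String :=
  let best := labels.foldl
    (fun (st : Option (String × (Bool × Bool × Int))) label =>
      if label == "" then st
      else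
        let k := keyB label
        match st with
        | none => some (label, k)
        | some (_, bk) => if keyGt k bk then some (label, k) else st)
    none
  match best with
  | none => fallback
  | some (b, _) => b

-- ===== PRECONDITION & SPEC =====
def Spec_preferred_label (labels : List String) (fallback : String) (out : String) : Prop := out = preferred_label_alt labels fallback
instance (labels : List String) (fallback : String) (out : String) : Decidable (Spec_preferred_label labels fallback out) := by unfold Spec_preferred_label; infer_instance

-- ===== CLAIM (what is proved, stated in full; the proofs are below) =====
def Claim_equal_preferred_label : Prop := ∀ (labels : List String) (fallback : String), Dom_preferred_label labels fallback → Spec_preferred_label labels fallback (preferred_label labels fallback)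

-- ===== LEMMAS AND PROOFS =====

-- the reverse comparator sorted2 uses, specialised to our keys
def beforeA (x y : String) : Bool :=
  decide (keyA1 y < keyA1 x) || !decide (keyA1 x < keyA1 y) && decide (keyA2 y < keyA2 x)

-- a string-only version of B's loop (the key is recomputed instead of cached)
def bstep (st : Option String) (l : String) : Option String :=
  match st with
  | none => some l
  | some b => if keyGt (keyB l) (keyB b) then some l else st

theorem beforeA_eq_keyGt (x y : String) : beforeA x y = keyGt (keyB x) (keyB y) := by
  unfold beforeA keyA1 keyA2 keyGt keyB
  rcases h1 : PySem.Str.isIn " " x <;> rcases h2 : PySem.Str.lower x == x <;>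
    rcases h3 : PySem.Str.isIn " " y <;> rcases h4 : PySem.Str.lower y == y <;>
    simp_all

theorem head?_insertBy (x : String) (acc : List String) :
    (PySem.List.insertBy beforeA x acc).head? =
      some (match acc with | [] => x | y :: _ => if beforeA x y then x else y) := by
  cases acc with
  | nil => simp [PySem.List.insertBy]
  | cons y ys =>
    simp only [PySem.List.insertBy]
    split <;> simp_all

theorem foldl_insertBy_head? (xs : List String) (acc : List String) :
    (xs.foldl (fun acc x => PySem.List.insertBy beforeA x acc) acc).head? =
      xs.foldl bstep acc.head? := by
  induction xs generalizing acc with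
  | nil => rfl
  | cons x xs ih =>
    simp only [List.foldl_cons]
    rw [ih, head?_insertBy]
    congr 1
    cases acc with
    | nil => rfl
    | cons y ys =>
      simp only [List.head?_cons, bstep, beforeA_eq_keyGt]
      rcases h : keyGt (keyB x) (keyB y) <;> simp

-- B's cached-key fold projects to the string-only fold bstep
theorem foldl_bfold_eq (xs : List String) (st : Option (String × (Bool × Bool × Int)))
    (hst : (st.map Prod.snd) = st.map (fun p => keyB p.1)) :
    (xs.foldl
      (fun (st : Option (String × (Bool × Bool × Int))) label =>
        if label == "" then st
        else
          let k := keyB label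
          match st with
          | none => some (label, k)
          | some (_, bk) => if keyGt k bk then some (label, k) else st)
      st).map Prod.fst =
    (xs.filter (fun l => l != "")).foldl bstep (st.map Prod.fst) := by
  induction xs generalizing st with
  | nil => rfl
  | cons x xs ih =>
    by_cases hx : x = ""
    · subst hx; simpa using ih st hst
    · have hx' : (x == "") = false := by simp [hx]
      simp only [List.foldl_cons, hx', List.filter_cons, if_neg, Bool.not_eq_true]
      cases st with
      | none =>
        rw [ih _ (by simp)]
        simp [hx, bstep]
      | some p =>
        obtain ⟨b, bk⟩ := p
        have hbk : bk = keyB b := by simpa using hst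
        subst hbk
        rcases hgt : keyGt (keyB x) (keyB b) with _ | _
        · rw [ih _ (by simp [hgt])]
          simp [hx, bstep, hgt]
        · rw [ih _ (by simp [hgt])]
          simp [hx, bstep, hgt]

theorem bstep_some (xs : List String) (b : String) :
    ∃ r, xs.foldl bstep (some b) = some r := by
  induction xs generalizing b with
  | nil => exact ⟨b, rfl⟩
  | cons x xs ih =>
    simp only [List.foldl_cons, bstep]
    split <;> exact ih _

-- ===== VERDICT (by name: the statement is the Claim_ definition above) =====
theorem preferred_label_spec : Claim_equal_preferred_label := by
  intro labels fallback _
  unfold Spec_preferred_label preferred_label preferred_label_alt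
  simp only []
  set step := (fun (st : Option (String × (Bool × Bool × Int))) label =>
      if label == "" then st
      else
        let k := keyB label
        match st with
        | none => some (label, k)
        | some (_, bk) => if keyGt k bk then some (label, k) else st) with hstep
  set ne := labels.filter (fun l => l != "") with hne_def
  have hB : (labels.foldl step none).map Prod.fst = ne.foldl bstep none := by
    rw [hstep, hne_def]
    exact foldl_bfold_eq labels none (by simp)
  have hsorted : PySem.List.sorted2 ne keyA1 keyA2 true
      = ne.foldl (fun acc x => PySem.List.insertBy beforeA x acc) [] := by
    simp only [PySem.List.sorted2]
    rfl
  have hhead : (PySem.List.sorted2 ne keyA1 keyA2 true).head? = ne.foldl bstep none := by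
    rw [hsorted, foldl_insertBy_head?]
    rfl
  cases hne : ne with
  | nil =>
    have hF : labels.foldl step none = none := by
      rcases h : labels.foldl step none with _ | p
      · rfl
      · exfalso
        rw [h, hne] at hB
        simp at hB
    rw [hF]
    rfl
  | cons y ys =>
    rw [hne] at hB hhead
    simp only [List.foldl_cons, bstep] at hB hhead
    obtain ⟨r, hr⟩ := bstep_some ys y
    rw [hr] at hB hhead
    rcases hF : labels.foldl step none with _ | p
    · exfalso
      rw [hF] at hB
      simp at hB
    · rw [hF] at hB
      simp only [Option.map_some, Option.some.injEq] at hB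
      simp only [List.isEmpty_cons, Bool.false_eq_true, if_false]
      rcases hs : PySem.List.sorted2 (y :: ys) keyA1 keyA2 true with _ | ⟨m, t⟩
      · rw [hs] at hhead
        simp at hhead
      · rw [hs] at hhead
        simp only [List.head?_cons, Option.some.injEq] at hhead
        obtain ⟨b, bk⟩ := p
        simp [hhead, ← hB]
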